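-- pv_equiv track=rewrite | github.com/sfncore/frankentui | scripts/gen-carapace-spec.py | yaml_str
-- ===== SOURCE A (Python) =====
-- def yaml_str(s: str) -> str:
--     """Escape a string for YAML output."""
--     if not s:
--         return '""'
--     # If it contains characters that need quoting, use double quotes
--     if any(c in s for c in (':', '#', '{', '}', '[', ']', ',', '&', '*', '?', '|',
--                              '-', '<', '>', '=', '!', '%', '@', '`', '"', "'", '\n')):
--         escaped = s.replace("\\", "\\\\").replace('"', '\\"')
--         return f'"{escaped}"'
--     return s
-- ===== SOURCE B (Python) =====
-- _YAML_SPECIALS = frozenset((':', '#', '{', '}', '[', ']', ',', '&', '*', '?', '|',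
--                             '-', '<', '>', '=', '!', '%', '@', '`', '"', "'", '\n'))
--
--
-- def yaml_str(s: str) -> str:
--     """Escape a string for YAML output."""
--     if not s:
--         return '""'
--     need_quote = False
--     acc = []
--     for c in s:
--         if c in _YAML_SPECIALS:
--             need_quote = True
--         if c == '\\':
--             acc.append('\\\\')
--         elif c == '"':
--             acc.append('\\"')
--         else:
--             acc.append(c)
--     if need_quote:
--         return '"' + ''.join(acc) + '"'
--     return s
-- ===== Notes on version B (the rewrite author's own statement) =====
-- stated objective: alternative
-- what changed: Replaces A's 22 whole-string membership scans plus two full replace() passes by one single pass over the characters that simultaneously detects the need for quoting (via a frozenset) and builds the escaped buffer, returning the original string when no special character was seen.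
import Mathlib
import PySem

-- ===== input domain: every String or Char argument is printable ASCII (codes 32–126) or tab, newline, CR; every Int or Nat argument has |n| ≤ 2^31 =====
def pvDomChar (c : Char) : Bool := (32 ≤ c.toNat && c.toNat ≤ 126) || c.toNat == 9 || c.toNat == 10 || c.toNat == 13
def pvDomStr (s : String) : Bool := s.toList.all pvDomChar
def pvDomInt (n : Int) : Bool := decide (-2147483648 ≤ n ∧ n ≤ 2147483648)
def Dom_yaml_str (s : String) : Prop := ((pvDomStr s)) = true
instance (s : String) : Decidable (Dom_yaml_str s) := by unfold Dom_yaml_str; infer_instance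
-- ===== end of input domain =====

-- B makes one combined pass that both detects the need for quoting and builds the
-- escaped buffer, instead of A's 22 substring scans followed by two replace() passes.
-- Same return value; objective: alternative (single traversal).

-- ===== PORT A =====
-- the tuple of special one-char strings from A
def yamlSpecialsA : List String :=
  [":", "#", "{", "}", "[", "]", ",", "&", "*", "?", "|",
   "-", "<", ">", "=", "!", "%", "@", "`", "\"", "'", "\n"]

def yaml_str (s : String) : String :=
  if s = "" then "\"\""
  else if yamlSpecialsA.any (fun c => PySem.Str.isIn c s) then
    -- s.replace("\\", "\\\\").replace('"', '\\"'), then f'"{escaped}"'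
    -- (the f-string concatenation is written as an exact List Char concatenation)
    let escaped := PySem.Str.replace (PySem.Str.replace s "\\" "\\\\") "\"" "\\\""
    String.mk ('"' :: (escaped.toList ++ ['"']))
  else s

-- ===== PORT B =====
-- the frozenset of special characters
def yamlSpecialSet : List Char :=
  PySem.Set.ofList [':', '#', '{', '}', '[', ']', ',', '&', '*', '?', '|',
                    '-', '<', '>', '=', '!', '%', '@', '`', '"', '\'', '\n']

-- the body of B's loop step producing the escaped piece for one character
def yamlEsc (c : Char) : List Char :=
  if c = '\\' then ['\\', '\\'] else if c = '"' then ['\\', '"'] else [c]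

def yaml_str_alt (s : String) : String :=
  if s = "" then "\"\""
  else
    let st := s.toList.foldl
      (fun (p : List Char × Bool) c =>
        (p.1 ++ yamlEsc c, p.2 || PySem.Set.contains yamlSpecialSet c))
      ([], false)
    if st.2 then String.mk ('"' :: (st.1 ++ ['"'])) else s

-- ===== PRECONDITION & SPEC =====
def Spec_yaml_str (s : String) (out : String) : Prop := out = yaml_str_alt s
instance (s : String) (out : String) : Decidable (Spec_yaml_str s out) := by unfold Spec_yaml_str; infer_instance

-- ===== CLAIM (what is proved, stated in full; the proofs are below) =====
def Claim_equal_yaml_str : Prop := ∀ (s : String), Dom_yaml_str s → Spec_yaml_str s (yaml_str s)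

-- ===== LEMMAS AND PROOFS =====

-- a singleton list is an infix iff its element is a member
theorem infix_singleton_iff {α : Type} (a : α) (l : List α) : [a] <:+: l ↔ a ∈ l := by
  constructor
  · intro h
    exact h.subset (List.mem_singleton_self a)
  · intro h
    obtain ⟨l1, l2, rfl⟩ := List.append_of_mem h
    exact ⟨l1, l2, by simp⟩

theorem isIn_single (c : Char) (cs : List Char) :
    PySem.Chars.isIn [c] cs = cs.contains c := by
  by_cases h : c ∈ cs
  · rw [(PySem.Chars.isIn_iff_infix _ _).2 ((infix_singleton_iff c cs).2 h)]
    simp [h]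
  · rw [(PySem.Chars.isIn_eq_false_iff _ _).2 (fun hin => h ((infix_singleton_iff c cs).1 hin))]
    simp [h]

-- single-character replace is a flatMap
theorem replace_go_single (a : Char) (new : List Char) :
    ∀ (fuel : Nat) (l acc : List Char), l.length ≤ fuel →
      PySem.Chars.replace.go [a] new fuel l acc
        = acc.reverse ++ l.flatMap (fun c => if c = a then new else [c]) := by
  intro fuel
  induction fuel with
  | zero =>
    intro l acc h
    have : l = [] := List.length_eq_zero_iff.1 (Nat.le_zero.1 h)
    subst this
    simp [PySem.Chars.replace.go]
  | succ n ih =>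
    intro l acc h
    cases l with
    | nil => simp [PySem.Chars.replace.go]
    | cons c t =>
      simp only [PySem.Chars.replace.go]
      have hpre : List.isPrefixOf [a] (c :: t) = (a == c) := by
        simp [List.isPrefixOf]
      rw [hpre]
      by_cases hca : a = c
      · subst hca
        simp only [beq_self_eq_true, if_true]
        have : List.drop [a].length (a :: t) = t := by simp
        rw [this, ih t _ (by simpa using Nat.lt_succ_iff.1 (by simpa using h))]
        simp
      · have : (a == c) = false := by simp [hca]
        rw [this]
        simp only [Bool.false_eq_true, if_false]
        rw [ih t _ (by simpa using Nat.lt_succ_iff.1 (by simpa using h))]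
        simp [Ne.symm hca]

theorem replace_single (a : Char) (new : List Char) (cs : List Char) :
    PySem.Chars.replace cs [a] new
      = cs.flatMap (fun c => if c = a then new else [c]) := by
  rw [PySem.Chars.replace]
  simp only [List.isEmpty_cons, Bool.false_eq_true, if_false]
  exact replace_go_single a new cs.length cs [] (le_refl _)

-- the two chained replaces of A equal B's per-character escaping
theorem double_replace_eq_flatMap (cs : List Char) :
    PySem.Chars.replace (PySem.Chars.replace cs ['\\'] ['\\', '\\']) ['"'] ['\\', '"']
      = cs.flatMap yamlEsc := by
  rw [replace_single, replace_single, List.flatMap_assoc]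
  apply List.flatMap_congr
  intro c _
  by_cases h1 : c = '\\'
  · subst h1; simp [yamlEsc]
  · by_cases h2 : c = '"'
    · subst h2; simp [yamlEsc]
    · simp [yamlEsc, h1, h2]

-- B's fold in closed form
theorem fold_closed (l : List Char) (acc : List Char) (b : Bool) :
    l.foldl
      (fun (p : List Char × Bool) c =>
        (p.1 ++ yamlEsc c, p.2 || PySem.Set.contains yamlSpecialSet c))
      (acc, b)
      = (acc ++ l.flatMap yamlEsc,
         b || l.any (fun c => PySem.Set.contains yamlSpecialSet c)) := by
  induction l generalizing acc b with
  | nil => simp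
  | cons c t ih =>
    simp only [List.foldl_cons, List.flatMap_cons, List.any_cons]
    rw [ih]
    simp [Bool.or_assoc]

-- A's quoting condition equals B's
theorem any_contains_comm (l1 l2 : List Char) :
    l1.any (fun c => l2.contains c) = l2.any (fun c => l1.contains c) := by
  apply Bool.eq_iff_iff.2
  simp [List.any_eq_true]
  tauto

theorem cond_eq (s : String) :
    yamlSpecialsA.any (fun c => PySem.Str.isIn c s)
      = s.toList.any (fun c => PySem.Set.contains yamlSpecialSet c) := by
  have h1 : yamlSpecialsA.any (fun c => PySem.Str.isIn c s)
      = ([':', '#', '{', '}', '[', ']', ',', '&', '*', '?', '|',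
          '-', '<', '>', '=', '!', '%', '@', '`', '"', '\'', '\n'] : List Char).any
          (fun c => s.toList.contains c) := by
    simp [yamlSpecialsA, PySem.Str.isIn_eq, isIn_single]
  rw [h1, any_contains_comm]
  congr 1


-- ===== VERDICT (by name: the statement is the Claim_ definition above) =====
theorem yaml_str_spec : Claim_equal_yaml_str := by
  intro s _
  unfold Spec_yaml_str yaml_str yaml_str_alt
  by_cases h : s = ""
  · simp [h]
  · simp only [if_neg h, cond_eq s, fold_closed, List.nil_append, Bool.false_or]
    by_cases hc : (s.toList.any fun c => PySem.Set.contains yamlSpecialSet c) = true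
    · rw [if_pos hc, if_pos hc]
      have hrep : (PySem.Str.replace (PySem.Str.replace s "\\" "\\\\") "\"" "\\\"").toList
          = s.toList.flatMap yamlEsc := by
        rw [PySem.Str.toList_replace, PySem.Str.toList_replace]
        exact double_replace_eq_flatMap s.toList
      rw [hrep]
    · rw [if_neg hc, if_neg hc]
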